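-- pv_equiv track=rewrite | github.com/XVX-016/biosynth-monorepo | backend/tests/test_ml_pipeline_stress.py | generate_test_smiles
-- ===== SOURCE A (Python) =====
-- from typing import List, Dict, Any
--
-- def generate_test_smiles(count: int = 100) -> List[str]:
--     """Generate a list of test SMILES."""
--     base_smiles = [
--         "C", "CC", "CCC", "CCCC", "CCCCC",  # Alkanes
--         "C=C", "CC=CC", "C=CCC",  # Alkenes
--         "C#C", "CC#CC",  # Alkynes
--         "CCO", "CCCO", "CCOC",  # Alcohols and ethers
--         "c1ccccc1", "c1ccccc1C",  # Aromatics
--         "CC(=O)O", "CC(=O)CC",  # Ketones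
--         "CCOC(=O)O",  # Esters
--     ]
--
--     # Repeat and vary
--     smiles_list = []
--     for i in range(count):
--         smiles_list.append(base_smiles[i % len(base_smiles)])
--
--     return smiles_list
-- ===== SOURCE B (Python) =====
-- def generate_test_smiles(count: int = 100):
--     """Generate a list of test SMILES."""
--     base_smiles = [
--         "C", "CC", "CCC", "CCCC", "CCCCC",  # Alkanes
--         "C=C", "CC=CC", "C=CCC",  # Alkenes
--         "C#C", "CC#CC",  # Alkynes
--         "CCO", "CCCO", "CCOC",  # Alcohols and ethers
--         "c1ccccc1", "c1ccccc1C",  # Aromatics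
--         "CC(=O)O", "CC(=O)CC",  # Ketones
--         "CCOC(=O)O",  # Esters
--     ]
--     repeats = count // len(base_smiles) + 1
--     return (base_smiles * repeats)[:count]
-- ===== Notes on version B (the rewrite author's own statement) =====
-- stated objective: simpler
-- what changed: Replaces the per-index loop appending base_smiles[i % n] with computing repeats = count // n + 1, replicating the base list in bulk, and slicing to [:count].
import Mathlib
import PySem

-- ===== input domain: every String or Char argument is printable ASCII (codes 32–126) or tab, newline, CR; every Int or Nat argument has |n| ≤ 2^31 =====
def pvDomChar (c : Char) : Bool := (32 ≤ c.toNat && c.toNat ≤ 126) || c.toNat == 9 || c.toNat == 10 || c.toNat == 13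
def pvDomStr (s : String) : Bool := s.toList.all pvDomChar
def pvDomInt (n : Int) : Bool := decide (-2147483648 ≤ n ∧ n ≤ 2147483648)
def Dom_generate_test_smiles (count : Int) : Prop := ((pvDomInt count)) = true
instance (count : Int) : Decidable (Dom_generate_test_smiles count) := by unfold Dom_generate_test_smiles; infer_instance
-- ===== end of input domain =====

-- B replaces A's per-index modulo loop by bulk list replication plus one slice (objective: simpler).

-- the shared base_smiles literal (pure data, identical in both Pythons)
def pvBaseSmiles : List String :=
  ["C", "CC", "CCC", "CCCC", "CCCCC",
   "C=C", "CC=CC", "C=CCC",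
   "C#C", "CC#CC",
   "CCO", "CCCO", "CCOC",
   "c1ccccc1", "c1ccccc1C",
   "CC(=O)O", "CC(=O)CC",
   "CCOC(=O)O"]

-- ===== PORT A =====
-- for i in range(count): smiles_list.append(base_smiles[i % len(base_smiles)])
-- the index i % 18 is always in range, so pyGetD with a dummy default is exact
def generate_test_smiles (count : Int) : List String :=
  (PySem.List.pyRange 0 count 1).foldl
    (fun acc i => acc ++ [PySem.List.pyGetD pvBaseSmiles (PySem.Int.mod i (pvBaseSmiles.length : Int)) ""]) []

-- ===== PORT B =====
-- repeats = count // 18 + 1; (base_smiles * repeats)[:count]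
-- Python's list * k is empty for k ≤ 0, which .toNat's clamping reproduces exactly
def generate_test_smiles_alt (count : Int) : List String :=
  let repeats : Int := PySem.Int.floordiv count (pvBaseSmiles.length : Int) + 1
  PySem.List.slice (List.flatten (List.replicate repeats.toNat pvBaseSmiles)) none (some count)

-- ===== PRECONDITION & SPEC =====
def Spec_generate_test_smiles (count : Int) (out : List String) : Prop := out = generate_test_smiles_alt count
instance (count : Int) (out : List String) : Decidable (Spec_generate_test_smiles count out) := by unfold Spec_generate_test_smiles; infer_instance

-- ===== CLAIM (what is proved, stated in full; the proofs are below) =====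
def Claim_equal_generate_test_smiles : Prop := ∀ (count : Int), Dom_generate_test_smiles count → Spec_generate_test_smiles count (generate_test_smiles count)

-- ===== LEMMAS AND PROOFS =====

-- one full period of the cycle is the base list itself
lemma period_map : (List.range 18).map (fun j => pvBaseSmiles.getD (j % 18) "") = pvBaseSmiles := by
  decide

-- r copies of the base list, flattened, are the first r*18 values of the cycle
lemma rep_cycle (r : Nat) :
    List.flatten (List.replicate r pvBaseSmiles)
      = (List.range (r * 18)).map (fun k => pvBaseSmiles.getD (k % 18) "") := by
  induction r with
  | zero => simp
  | succ r ih =>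
      rw [List.replicate_succ', List.flatten_append, ih, Nat.succ_mul, List.range_add, List.map_append]
      congr 1
      · simp only [List.flatten_cons, List.flatten_nil, List.append_nil, List.map_map]
        symm
        calc (List.range 18).map ((fun k => pvBaseSmiles.getD (k % 18) "") ∘ fun x => r * 18 + x)
            = (List.range 18).map (fun j => pvBaseSmiles.getD (j % 18) "") := by
              apply List.map_congr_left
              intro j hj
              rw [List.mem_range] at hj
              show pvBaseSmiles.getD ((r * 18 + j) % 18) "" = _
              congr 1
              omega
          _ = pvBaseSmiles := period_map

-- A computes the first count.toNat values of the cycle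
lemma a_eq_cycle (count : Int) :
    generate_test_smiles count
      = (List.range count.toNat).map (fun k => pvBaseSmiles.getD (k % 18) "") := by
  unfold generate_test_smiles
  rw [PySem.List.foldl_append_singleton_eq_map, PySem.List.pyRange_one, List.map_map]
  simp only [Int.sub_zero, List.nil_append]
  apply List.map_congr_left
  intro k _
  show PySem.List.pyGetD pvBaseSmiles (PySem.Int.mod (0 + (k : Int)) (pvBaseSmiles.length : Int)) "" = _
  have hlen : (pvBaseSmiles.length : Int) = ((18 : Nat) : Int) := by decide
  rw [Int.zero_add, hlen, PySem.Int.mod_natCast, PySem.List.pyGetD_natCast]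

-- ===== VERDICT (by name: the statement is the Claim_ definition above) =====
theorem generate_test_smiles_spec : Claim_equal_generate_test_smiles := by
  intro count _
  show generate_test_smiles count = generate_test_smiles_alt count
  have hlen : (pvBaseSmiles.length : Int) = 18 := by decide
  show generate_test_smiles count
      = PySem.List.slice
          (List.flatten (List.replicate (PySem.Int.floordiv count (pvBaseSmiles.length : Int) + 1).toNat pvBaseSmiles))
          none (some count)
  rw [hlen]
  by_cases hc : 0 ≤ count
  · have hd : PySem.Int.floordiv count 18 = ((count.toNat / 18 : Nat) : Int) := by
      have := PySem.Int.floordiv_natCast count.toNat 18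
      rwa [Int.toNat_of_nonneg hc] at this
    rw [a_eq_cycle, hd, PySem.List.slice_to _ hc]
    have hr : (((count.toNat / 18 : Nat) : Int) + 1).toNat = count.toNat / 18 + 1 := by omega
    rw [hr, rep_cycle, ← List.map_take, List.take_range, Nat.min_eq_left (by omega)]
  · rw [Int.not_le] at hc
    have ha : generate_test_smiles count = [] := by
      unfold generate_test_smiles
      rw [PySem.List.pyRange_one_eq_nil (by omega)]
      rfl
    have hneg : PySem.Int.floordiv count 18 < 0 := by
      rw [PySem.Int.floordiv_lt_iff_lt_mul (by norm_num)]
      omega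
    have h0 : (PySem.Int.floordiv count 18 + 1).toNat = 0 := by omega
    rw [ha, h0]
    simp [PySem.List.slice]
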